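-- pv_equiv track=rewrite | github.com/AutomationSolutionz/Zeuz_Python_Node | Framework/New_MainDriverApi.py | get_final_dependency_list
-- ===== SOURCE A (Python) =====
-- def get_final_dependency_list(dependency_list, run_description):
--     dependency_list_final = {}
--     run_description = run_description.split("|")
--     for each in run_description:
--         if ":" not in each:
--             continue
--         for eachitem in dependency_list:
--             current_dependency = eachitem[0]
--             for eachitemlist in eachitem[1]:
--                 if each.split(":")[1].strip() == eachitemlist:
--                     current_item = each.split(":")[1].strip()
--                     dependency_list_final.update({current_dependency: current_item})
--     return dependency_list_final
-- ===== SOURCE B (Python) =====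
-- def get_final_dependency_list(dependency_list, run_description):
--     # Build a value -> [dependency names] index once, then do a single pass
--     # over the run_description segments with an O(1) lookup per segment.
--     index = {}
--     for dep, items in dependency_list:
--         for item in items:
--             index.setdefault(item, []).append(dep)
--     final = {}
--     for piece in run_description.split("|"):
--         if ":" in piece:
--             value = piece.split(":")[1].strip()
--             for dep in index.get(value, []):
--                 final[dep] = value
--     return final
-- ===== Notes on version B (the rewrite author's own statement) =====
-- stated objective: alternative
-- what changed: B precomputes a value->dependencies index from dependency_list once and does a single pass over the run_description segments with one lookup each, instead of A's rescan of every dependency's whole item list (with a re-split/re-strip per item) for every segment.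
import Mathlib
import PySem

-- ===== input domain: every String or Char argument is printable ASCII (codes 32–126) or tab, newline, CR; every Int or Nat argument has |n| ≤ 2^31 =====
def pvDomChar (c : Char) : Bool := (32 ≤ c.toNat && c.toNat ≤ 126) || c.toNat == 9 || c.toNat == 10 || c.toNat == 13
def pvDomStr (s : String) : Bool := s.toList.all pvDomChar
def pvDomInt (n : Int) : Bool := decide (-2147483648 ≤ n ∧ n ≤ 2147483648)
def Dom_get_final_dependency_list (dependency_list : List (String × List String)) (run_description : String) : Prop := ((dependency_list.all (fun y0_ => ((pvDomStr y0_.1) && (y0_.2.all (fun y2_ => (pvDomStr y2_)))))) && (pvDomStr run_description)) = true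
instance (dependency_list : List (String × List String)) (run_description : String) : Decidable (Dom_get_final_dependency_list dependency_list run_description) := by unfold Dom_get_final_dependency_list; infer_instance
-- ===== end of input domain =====

-- B replaces A's nested rescan of dependency_list per segment by a value→dependencies
-- index built once, then a single indexed pass over the run_description segments (objective: alternative).

-- ===== PORT A =====
-- split? is some whenever the separator is nonempty, so '.getD []' is dead code; 'each.split(":")[1]'
-- is always in range when ":" ∈ each, so pyGetD's default "" is dead code too.
def get_final_dependency_list (dependency_list : List (String × List String)) (run_description : String) : List (String × String) :=
  (((PySem.Str.split? run_description "|").getD []).foldl (fun (d : PySem.Dict String String) each =>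
    if PySem.Str.isIn ":" each then
      dependency_list.foldl (fun d eachitem =>
        eachitem.2.foldl (fun d eachitemlist =>
          if PySem.Str.strip (PySem.List.pyGetD ((PySem.Str.split? each ":").getD []) 1 "") == eachitemlist then
            d.insert eachitem.1 (PySem.Str.strip (PySem.List.pyGetD ((PySem.Str.split? each ":").getD []) 1 ""))
          else d) d) d
    else d) PySem.Dict.empty).items

-- ===== PORT B =====
def get_final_dependency_list_alt (dependency_list : List (String × List String)) (run_description : String) : List (String × String) :=
  let idx : PySem.Dict String (List String) :=
    dependency_list.foldl (fun idx e =>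
      e.2.foldl (fun idx item => idx.modify item [] (· ++ [e.1])) idx) PySem.Dict.empty
  (((PySem.Str.split? run_description "|").getD []).foldl (fun (d : PySem.Dict String String) piece =>
    if PySem.Str.isIn ":" piece then
      let v := PySem.Str.strip (PySem.List.pyGetD ((PySem.Str.split? piece ":").getD []) 1 "")
      (idx.getD v []).foldl (fun d dep => d.insert dep v) d
    else d) PySem.Dict.empty).items

-- ===== PRECONDITION & SPEC =====
def Spec_get_final_dependency_list (dependency_list : List (String × List String)) (run_description : String) (out : List (String × String)) : Prop := out = get_final_dependency_list_alt dependency_list run_description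
instance (dependency_list : List (String × List String)) (run_description : String) (out : List (String × String)) : Decidable (Spec_get_final_dependency_list dependency_list run_description out) := by unfold Spec_get_final_dependency_list; infer_instance

-- ===== CLAIM (what is proved, stated in full; the proofs are below) =====
def Claim_equal_get_final_dependency_list : Prop := ∀ (dependency_list : List (String × List String)) (run_description : String), Dom_get_final_dependency_list dependency_list run_description → Spec_get_final_dependency_list dependency_list run_description (get_final_dependency_list dependency_list run_description)

-- ===== LEMMAS AND PROOFS =====

-- Flattened pair list underlying both the index and A's nested scan.
def pvPairs (dependency_list : List (String × List String)) : List (String × String) :=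
  dependency_list.flatMap (fun e => e.2.map (fun it => (it, e.1)))

-- B's index looked up at v yields exactly the deps of the matching flattened pairs.
lemma idx_getD (dependency_list : List (String × List String)) (v : String) :
    ((dependency_list.foldl (fun idx e =>
        e.2.foldl (fun idx item => idx.modify item [] (· ++ [e.1])) idx)
        (PySem.Dict.empty : PySem.Dict String (List String))).getD v [])
    = ((pvPairs dependency_list).filter (fun p => p.1 == v)).map (·.2) := by
  have h : dependency_list.foldl (fun idx e =>
        e.2.foldl (fun idx item => idx.modify item [] (· ++ [e.1])) idx)
        (PySem.Dict.empty : PySem.Dict String (List String))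
      = (pvPairs dependency_list).foldl (fun d p => d.modify p.1 [] (· ++ [p.2]))
        PySem.Dict.empty := by
    rw [pvPairs, List.foldl_flatMap]
    have : (fun (idx : PySem.Dict String (List String)) (e : String × List String) =>
        e.2.foldl (fun idx item => idx.modify item [] (· ++ [e.1])) idx)
      = (fun idx e => (e.2.map (fun it => (it, e.1))).foldl
          (fun d p => d.modify p.1 [] (· ++ [p.2])) idx) := by
      funext idx e; rw [List.foldl_map]
    rw [this]
  rw [h, PySem.Dict.getD_foldl_modify_append, PySem.Dict.getD_empty, List.nil_append]

-- A's nested scan at value v equals folding insert over the index entry for v.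
lemma piece_eq (dependency_list : List (String × List String)) (v : String)
    (d : PySem.Dict String String) :
    dependency_list.foldl (fun d e =>
        e.2.foldl (fun d it => if v == it then d.insert e.1 v else d) d) d
    = (((pvPairs dependency_list).filter (fun p => p.1 == v)).map (·.2)).foldl
        (fun d dep => d.insert dep v) d := by
  rw [List.foldl_map, List.foldl_filter, pvPairs, List.foldl_flatMap]
  have : (fun (d : PySem.Dict String String) (e : String × List String) =>
      e.2.foldl (fun d it => if v == it then d.insert e.1 v else d) d)
    = (fun d e => (e.2.map (fun it => (it, e.1))).foldl
        (fun d p => if p.1 == v then d.insert p.2 v else d) d) := by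
    funext d e; rw [List.foldl_map]
    have hc : (fun (d : PySem.Dict String String) (it : String) =>
        if v == it then d.insert e.1 v else d)
      = (fun d it => if it == v then d.insert e.1 v else d) := by
      funext d it; rw [Bool.beq_comm]
    rw [hc]
  rw [this]

-- ===== VERDICT (by name: the statement is the Claim_ definition above) =====
theorem get_final_dependency_list_spec : Claim_equal_get_final_dependency_list := by
  intro dependency_list run_description _
  unfold Spec_get_final_dependency_list get_final_dependency_list get_final_dependency_list_alt
  congr 1
  apply PySem.List.foldl_congr_mem
  intro d each _
  by_cases h : PySem.Str.isIn ":" each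
  · simp only [h, if_true]
    rw [piece_eq, idx_getD]
  · rw [if_neg h, if_neg h]
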